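-- pv_equiv track=rewrite | github.com/GustSR/RJChronosConnect | services/olts-managers/olt-manager-huawei/src/commands/olt/get_current_configuration_cli.py | _parse_ont_srv_profile
-- ===== SOURCE A (Python) =====
-- from typing import Dict, Any, List, Optional
--
-- def _parse_ont_srv_profile(line: str) -> Optional[Dict[str, Any]]:
--     """Extrai informações do perfil de serviço ONT."""
--     try:
--         # Exemplo: ont-srvprofile gpon profile-id 1 profile-name srv_profile
--         parts = line.split()
--         profile = {}
--
--         for i, part in enumerate(parts):
--             if part == "profile-id" and i + 1 < len(parts):
--                 profile["profile_id"] = parts[i + 1]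
--             elif part == "profile-name" and i + 1 < len(parts):
--                 profile["profile_name"] = parts[i + 1]
--
--         return profile if profile else None
--     except:
--         return None
-- ===== SOURCE B (Python) =====
-- from typing import Dict, Any, Optional
--
-- def _parse_ont_srv_profile(line: str) -> Optional[Dict[str, Any]]:
--     """Extrai informações do perfil de serviço ONT (table-then-query rewrite)."""
--     try:
--         parts = line.split()
--         # Successor table: each token -> the token right after it (last occurrence wins).
--         follower = dict(zip(parts, parts[1:]))
--         rename = {"profile-id": "profile_id", "profile-name": "profile_name"}
--         profile = {rename[p]: follower[p] for p in parts if p in rename and p in follower}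
--         return profile if profile else None
--     except:
--         return None
-- ===== Notes on version B (the rewrite author's own statement) =====
-- stated objective: alternative
-- what changed: Replaces A's single index-driven scan (enumerate with parts[i+1] lookups) by a two-phase decomposition: first build a token-to-successor table via dict(zip(parts, parts[1:])), then fill the profile by dict lookups in that table (a comprehension over the tokens), with no index arithmetic.
import Mathlib
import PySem

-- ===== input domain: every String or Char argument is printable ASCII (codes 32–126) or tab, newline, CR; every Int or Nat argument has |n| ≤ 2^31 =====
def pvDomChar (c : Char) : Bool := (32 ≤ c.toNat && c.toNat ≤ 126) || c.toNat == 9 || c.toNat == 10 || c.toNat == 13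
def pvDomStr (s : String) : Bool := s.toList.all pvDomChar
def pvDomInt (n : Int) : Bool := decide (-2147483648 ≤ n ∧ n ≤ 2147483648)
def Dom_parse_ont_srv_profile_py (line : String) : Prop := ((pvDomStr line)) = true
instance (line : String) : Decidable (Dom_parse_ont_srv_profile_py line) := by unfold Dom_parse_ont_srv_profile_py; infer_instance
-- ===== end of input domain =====

-- B replaces A's index-driven scan by a two-phase table build (successor dict from zip) and query; same return value, objective: alternative decomposition.

-- ===== PORT A =====
-- try/except wrapper: the body can only raise at parts[i+1], which the i+1 < len guard makes unreachable, so the except branch is dead.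
def parse_ont_srv_profile_py (line : String) : Option (List (String × String)) :=
  let parts := PySem.Str.split₀ line
  let profile : PySem.Dict String String :=
    (PySem.List.enumerate parts).foldl
      (fun (d : PySem.Dict String String) ip =>
        if ip.2 = "profile-id" ∧ ip.1 + 1 < (parts.length : Int) then
          match PySem.List.pyGet? parts (ip.1 + 1) with
          | some v => d.insert "profile_id" v
          | none => d      -- unreachable: the guard puts ip.1 + 1 in range
        else if ip.2 = "profile-name" ∧ ip.1 + 1 < (parts.length : Int) then
          match PySem.List.pyGet? parts (ip.1 + 1) with
          | some v => d.insert "profile_name" v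
          | none => d      -- unreachable: the guard puts ip.1 + 1 in range
        else d)
      PySem.Dict.empty
  if profile.items = [] then none else some profile.items

-- ===== PORT B =====
-- try/except wrapper of Source B: nothing in the body can raise (all dict accesses are guarded), so the except branch is dead.
def parse_ont_srv_profile_py_alt (line : String) : Option (List (String × String)) :=
  let parts := PySem.Str.split₀ line
  let follower : PySem.Dict String String :=
    (parts.zip (PySem.List.slice parts (some 1) none)).foldl
      (fun (d : PySem.Dict String String) pr => d.insert pr.1 pr.2) PySem.Dict.empty
  let rename : PySem.Dict String String :=
    PySem.Dict.ofList [("profile-id", "profile_id"), ("profile-name", "profile_name")]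
  let profile : PySem.Dict String String :=
    parts.foldl
      (fun (d : PySem.Dict String String) p =>
        match rename.get? p, follower.get? p with
        | some k, some v => d.insert k v
        | _, _ => d) PySem.Dict.empty
  if profile.items = [] then none else some profile.items

-- ===== PRECONDITION & SPEC =====
def Spec_parse_ont_srv_profile_py (line : String) (out : Option (List (String × String))) : Prop := out = parse_ont_srv_profile_py_alt line
instance (line : String) (out : Option (List (String × String))) : Decidable (Spec_parse_ont_srv_profile_py line out) := by unfold Spec_parse_ont_srv_profile_py; infer_instance

-- ===== CLAIM (what is proved, stated in full; the proofs are below) =====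
def Claim_equal_parse_ont_srv_profile_py : Prop := ∀ (line : String), Dom_parse_ont_srv_profile_py line → Spec_parse_ont_srv_profile_py line (parse_ont_srv_profile_py line)

-- ===== LEMMAS AND PROOFS =====

-- Abstract state: (value at "profile_id", value at "profile_name", name-was-inserted-first flag)
def pvToDict (s : Option String × Option String × Bool) : PySem.Dict String String :=
  PySem.Dict.mk
    (match s.1, s.2.1 with
     | none, none => []
     | some v, none => [("profile_id", v)]
     | none, some w => [("profile_name", w)]
     | some v, some w =>
         if s.2.2 then [("profile_name", w), ("profile_id", v)]
         else [("profile_id", v), ("profile_name", w)])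

def pvDStep (d : PySem.Dict String String) (k v : String) : PySem.Dict String String :=
  if k = "profile-id" then d.insert "profile_id" v
  else if k = "profile-name" then d.insert "profile_name" v
  else d

def pvSStep (s : Option String × Option String × Bool) (k v : String) :
    Option String × Option String × Bool :=
  if k = "profile-id" then (some v, s.2.1, if s.1.isSome then s.2.2 else s.2.1.isSome)
  else if k = "profile-name" then (s.1, some v, if s.2.1.isSome then s.2.2 else !s.1.isSome)
  else s

-- last follower of k in the pair list = the value an insert-fold dict holds at k
def pvLF (k : String) (L : List (String × String)) : Option String :=
  L.foldl (fun a pr => if pr.1 = k then some pr.2 else a) none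

def pvRen (p : String) : Option String :=
  if p = "profile-id" then some "profile_id"
  else if p = "profile-name" then some "profile_name" else none

def pvBStep (L : List (String × String)) (s : Option String × Option String × Bool)
    (p : String) : Option String × Option String × Bool :=
  match pvRen p, pvLF p L with
  | some _, some v => pvSStep s p v
  | _, _ => s

def pvRunA (s : Option String × Option String × Bool) (L : List (String × String)) :
    Option String × Option String × Bool :=
  L.foldl (fun s pr => pvSStep s pr.1 pr.2) s

def pvRunB (L : List (String × String)) (s : Option String × Option String × Bool)
    (ks : List String) : Option String × Option String × Bool :=
  ks.foldl (pvBStep L) s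

def pvProj (s : Option String × Option String × Bool) : Bool × Bool × Bool :=
  (s.1.isSome, s.2.1.isSome, s.2.2)

def pvPStep (p : Bool × Bool × Bool) (k : String) : Bool × Bool × Bool :=
  if k = "profile-id" then (true, p.2.1, if p.1 then p.2.2 else p.2.1)
  else if k = "profile-name" then (p.1, true, if p.2.1 then p.2.2 else !p.1)
  else p

lemma pv_sim (s : Option String × Option String × Bool) (k v : String) :
    pvDStep (pvToDict s) k v = pvToDict (pvSStep s k v) := by
  obtain ⟨oi, on, nf⟩ := s
  by_cases h1 : k = "profile-id" <;> by_cases h2 : k = "profile-name" <;>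
    cases oi <;> cases on <;> cases nf <;>
    simp_all [pvDStep, pvSStep, pvToDict, PySem.Dict.insert, PySem.Dict.contains]

lemma pv_foldA_toDict (L : List (String × String)) (s : Option String × Option String × Bool) :
    L.foldl (fun d pr => pvDStep d pr.1 pr.2) (pvToDict s) = pvToDict (pvRunA s L) := by
  induction L generalizing s with
  | nil => rfl
  | cons a L ih =>
      simp only [pvRunA, List.foldl_cons] at *
      rw [pv_sim, ih]

lemma pv_bsim (L : List (String × String)) (s : Option String × Option String × Bool)
    (p : String) :
    (match pvRen p, pvLF p L with
     | some k', some v => (pvToDict s).insert k' v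
     | _, _ => pvToDict s) = pvToDict (pvBStep L s p) := by
  cases h2 : pvRen p with
  | none => cases h : pvLF p L <;> simp [pvBStep, h2, h]
  | some k' =>
      cases h : pvLF p L with
      | none => simp [pvBStep, h2, h]
      | some v =>
          simp only [pvBStep, h2, h]
          rw [← pv_sim s p v]
          by_cases h1 : p = "profile-id"
          · subst h1
            have hk : k' = "profile_id" := by simpa [pvRen] using h2.symm
            subst hk; simp [pvDStep]
          · by_cases hb : p = "profile-name"
            · subst hb
              have : k' = "profile_name" := by simpa [pvRen] using h2.symm
              subst this; simp [pvDStep]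
            · simp [pvRen, h1, hb] at h2

lemma pv_foldB_toDict (L : List (String × String)) (ks : List String)
    (s : Option String × Option String × Bool) :
    ks.foldl
      (fun d p =>
        match pvRen p, pvLF p L with
        | some k', some v => d.insert k' v
        | _, _ => d) (pvToDict s)
      = pvToDict (pvRunB L s ks) := by
  induction ks generalizing s with
  | nil => rfl
  | cons p ks ih =>
      simp only [pvRunB, List.foldl_cons] at *
      rw [pv_bsim, ih]

lemma pv_follower_get (L : List (String × String)) (d : PySem.Dict String String) (k : String) :
    (L.foldl (fun (d : PySem.Dict String String) pr => d.insert pr.1 pr.2) d).get? k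
      = L.foldl (fun a pr => if pr.1 = k then some pr.2 else a) (d.get? k) := by
  induction L generalizing d with
  | nil => rfl
  | cons a L ih =>
      simp only [List.foldl_cons, ih]
      congr 1
      by_cases h : a.1 = k
      · subst h; rw [PySem.Dict.get?_insert_self]; simp
      · rw [PySem.Dict.get?_insert_of_ne _ _ (by exact fun hh => h hh.symm)]; simp [h]

lemma pv_ren_get (p : String) :
    (PySem.Dict.ofList [("profile-id", "profile_id"), ("profile-name", "profile_name")]
        : PySem.Dict String String).get? p = pvRen p := by
  have h0 : (PySem.Dict.ofList [("profile-id", "profile_id"), ("profile-name", "profile_name")]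
      : PySem.Dict String String)
      = PySem.Dict.mk [("profile-id", "profile_id"), ("profile-name", "profile_name")] := rfl
  rw [h0, PySem.Dict.get?_mk_cons, PySem.Dict.get?_mk_cons]
  have hmk : (PySem.Dict.mk ([] : List (String × String))).get? p = none := rfl
  rw [hmk]
  unfold pvRen
  simp only [beq_iff_eq]
  by_cases h1 : p = "profile-id"
  · subst h1; simp
  · by_cases h2 : p = "profile-name"
    · subst h2; simp
    · rw [if_neg (fun hh => h1 hh.symm), if_neg (fun hh => h2 hh.symm), if_neg h1, if_neg h2]

lemma pv_lf_not_mem (k : String) (L : List (String × String)) (o : Option String)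
    (h : k ∉ L.map Prod.fst) : L.foldl (fun a pr => if pr.1 = k then some pr.2 else a) o = o := by
  induction L generalizing o with
  | nil => rfl
  | cons a L ih =>
      simp only [List.map_cons, List.mem_cons, not_or] at h
      simp only [List.foldl_cons]
      rw [if_neg (fun hh : a.1 = k => h.1 hh.symm)]
      exact ih o h.2

lemma pv_lf_isSome_pres (k : String) (L : List (String × String)) (o : Option String)
    (h : o.isSome) : (L.foldl (fun a pr => if pr.1 = k then some pr.2 else a) o).isSome := by
  induction L generalizing o with
  | nil => exact h
  | cons a L ih =>
      simp only [List.foldl_cons]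
      by_cases hh : a.1 = k
      · exact ih _ (by simp [hh])
      · exact ih _ (by simp [hh, h])

lemma pv_lf_isSome_of_mem (k : String) (L : List (String × String))
    (h : k ∈ L.map Prod.fst) : (pvLF k L).isSome := by
  induction L with
  | nil => simp at h
  | cons a L ih =>
      unfold pvLF
      simp only [List.foldl_cons]
      by_cases hh : a.1 = k
      · exact pv_lf_isSome_pres _ _ _ (by simp [hh])
      · simp only [if_neg hh]
        simp only [List.map_cons, List.mem_cons] at h
        rcases h with h | h
        · exact absurd h.symm hh
        · exact ih h

lemma pv_lf_mem_of_isSome (k : String) (L : List (String × String))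
    (h : (pvLF k L).isSome) : k ∈ L.map Prod.fst := by
  by_contra hm
  rw [pvLF, pv_lf_not_mem k L none hm] at h
  simp at h

lemma pv_map_fst_zip_tail (parts : List String) :
    (parts.zip parts.tail).map Prod.fst = parts.dropLast := by
  induction parts with
  | nil => rfl
  | cons x xs ih =>
      cases xs with
      | nil => rfl
      | cons y r => simpa using ih

lemma pv_sstep_fst (s : Option String × Option String × Bool) (k v : String) :
    (pvSStep s k v).1 = if k = "profile-id" then some v else s.1 := by
  by_cases h1 : k = "profile-id" <;> by_cases h2 : k = "profile-name" <;> simp_all [pvSStep]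

lemma pv_sstep_snd (s : Option String × Option String × Bool) (k v : String) :
    (pvSStep s k v).2.1 = if k = "profile-name" then some v else s.2.1 := by
  by_cases h1 : k = "profile-id" <;> by_cases h2 : k = "profile-name" <;> simp_all [pvSStep]

lemma pv_proj_sstep (s : Option String × Option String × Bool) (k v : String) :
    pvProj (pvSStep s k v) = pvPStep (pvProj s) k := by
  by_cases h1 : k = "profile-id" <;> by_cases h2 : k = "profile-name" <;>
    simp_all [pvSStep, pvPStep, pvProj]

lemma pv_runA_fst (L : List (String × String)) (s : Option String × Option String × Bool) :
    (pvRunA s L).1 = L.foldl (fun a pr => if pr.1 = "profile-id" then some pr.2 else a) s.1 := by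
  induction L generalizing s with
  | nil => rfl
  | cons a L ih =>
      simp only [pvRunA, List.foldl_cons] at *
      rw [ih, pv_sstep_fst]

lemma pv_runA_snd (L : List (String × String)) (s : Option String × Option String × Bool) :
    (pvRunA s L).2.1 = L.foldl (fun a pr => if pr.1 = "profile-name" then some pr.2 else a) s.2.1 := by
  induction L generalizing s with
  | nil => rfl
  | cons a L ih =>
      simp only [pvRunA, List.foldl_cons] at *
      rw [ih, pv_sstep_snd]

lemma pv_runA_proj (L : List (String × String)) (s : Option String × Option String × Bool) :
    pvProj (pvRunA s L) = (L.map Prod.fst).foldl pvPStep (pvProj s) := by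
  induction L generalizing s with
  | nil => rfl
  | cons a L ih =>
      simp only [pvRunA, List.foldl_cons, List.map_cons] at *
      rw [ih, pv_proj_sstep]

lemma pv_bstep_fst (L : List (String × String)) (s : Option String × Option String × Bool)
    (p : String) :
    (pvBStep L s p).1
      = if p = "profile-id" ∧ (pvLF "profile-id" L).isSome then pvLF "profile-id" L else s.1 := by
  by_cases h1 : p = "profile-id"
  · subst h1
    cases h : pvLF "profile-id" L <;>
      simp [pvBStep, pvRen, h, pv_sstep_fst]
  · cases h2 : pvRen p <;> cases h : pvLF p L <;>
      simp [pvBStep, h1, h2, h, pv_sstep_fst]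

lemma pv_bstep_snd (L : List (String × String)) (s : Option String × Option String × Bool)
    (p : String) :
    (pvBStep L s p).2.1
      = if p = "profile-name" ∧ (pvLF "profile-name" L).isSome then pvLF "profile-name" L else s.2.1 := by
  by_cases h1 : p = "profile-name"
  · subst h1
    cases h : pvLF "profile-name" L <;>
      simp [pvBStep, pvRen, h, pv_sstep_snd]
  · cases h2 : pvRen p <;> cases h : pvLF p L <;>
      simp [pvBStep, h1, h2, h, pv_sstep_snd]

lemma pv_runB_fst (L : List (String × String)) (ks : List String)
    (s : Option String × Option String × Bool) :
    (pvRunB L s ks).1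
      = if "profile-id" ∈ ks ∧ (pvLF "profile-id" L).isSome then pvLF "profile-id" L else s.1 := by
  induction ks generalizing s with
  | nil => simp [pvRunB]
  | cons p ks ih =>
      simp only [pvRunB, List.foldl_cons] at *
      rw [ih, pv_bstep_fst]
      by_cases hs : (pvLF "profile-id" L).isSome <;>
        by_cases hm : "profile-id" ∈ ks <;> by_cases hp : p = "profile-id" <;>
        simp [hs, hm, hp, List.mem_cons]
      · intro hh; exact absurd hh.symm hp

lemma pv_runB_snd (L : List (String × String)) (ks : List String)
    (s : Option String × Option String × Bool) :
    (pvRunB L s ks).2.1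
      = if "profile-name" ∈ ks ∧ (pvLF "profile-name" L).isSome then pvLF "profile-name" L else s.2.1 := by
  induction ks generalizing s with
  | nil => simp [pvRunB]
  | cons p ks ih =>
      simp only [pvRunB, List.foldl_cons] at *
      rw [ih, pv_bstep_snd]
      by_cases hs : (pvLF "profile-name" L).isSome <;>
        by_cases hm : "profile-name" ∈ ks <;> by_cases hp : p = "profile-name" <;>
        simp [hs, hm, hp, List.mem_cons]
      · intro hh; exact absurd hh.symm hp

lemma pv_runB_proj (L : List (String × String)) (ks : List String)
    (s : Option String × Option String × Bool) :
    pvProj (pvRunB L s ks)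
      = ks.foldl (fun q p => if (pvRen p).isSome ∧ (pvLF p L).isSome then pvPStep q p else q)
          (pvProj s) := by
  induction ks generalizing s with
  | nil => rfl
  | cons p ks ih =>
      simp only [pvRunB, List.foldl_cons] at *
      rw [ih]
      congr 1
      cases h2 : pvRen p with
      | none => cases h : pvLF p L <;> simp [pvBStep, h2, h]
      | some k' =>
          cases h : pvLF p L with
          | none => simp [pvBStep, h2, h]
          | some v => simp [pvBStep, h2, h, pv_proj_sstep]

lemma pv_pfold_fst (ks : List String) (q : Bool × Bool × Bool) :
    (ks.foldl pvPStep q).1 = (q.1 || decide ("profile-id" ∈ ks)) := by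
  induction ks generalizing q with
  | nil => simp
  | cons k ks ih =>
      have hstep : (pvPStep q k).1 = (q.1 || decide (k = "profile-id")) := by
        by_cases h1 : k = "profile-id" <;> by_cases h2 : k = "profile-name" <;>
          simp_all [pvPStep]
      simp only [List.foldl_cons, ih, hstep, List.mem_cons]
      by_cases h : k = "profile-id" <;> by_cases hm : "profile-id" ∈ ks <;> simp [h, hm]
      · intro hh; exact absurd hh.symm h

lemma pv_pfold_snd (ks : List String) (q : Bool × Bool × Bool) :
    (ks.foldl pvPStep q).2.1 = (q.2.1 || decide ("profile-name" ∈ ks)) := by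
  induction ks generalizing q with
  | nil => simp
  | cons k ks ih =>
      have hstep : (pvPStep q k).2.1 = (q.2.1 || decide (k = "profile-name")) := by
        by_cases h1 : k = "profile-id" <;> by_cases h2 : k = "profile-name" <;>
          simp_all [pvPStep]
      simp only [List.foldl_cons, ih, hstep, List.mem_cons]
      by_cases h : k = "profile-name" <;> by_cases hm : "profile-name" ∈ ks <;> simp [h, hm]
      · intro hh; exact absurd hh.symm h

lemma pv_flag_fold (L : List (String × String)) (parts : List String)
    (hL : L.map Prod.fst = parts.dropLast) :
    parts.foldl
        (fun q p => if (pvRen p).isSome ∧ (pvLF p L).isSome then pvPStep q p else q)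
        ((false, false, false) : Bool × Bool × Bool)
      = (L.map Prod.fst).foldl pvPStep ((false, false, false) : Bool × Bool × Bool) := by
  rw [hL]
  rcases eq_or_ne parts [] with h | h
  · subst h; rfl
  · conv_lhs => rw [← List.dropLast_append_getLast h]
    rw [List.foldl_append]
    have hcong :
        parts.dropLast.foldl
            (fun q p => if (pvRen p).isSome ∧ (pvLF p L).isSome then pvPStep q p else q)
            ((false, false, false) : Bool × Bool × Bool)
          = parts.dropLast.foldl pvPStep ((false, false, false) : Bool × Bool × Bool) := by
      refine PySem.List.foldl_congr_mem _ _ _ _ ?_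
      intro acc x hx
      by_cases hr : (pvRen x).isSome
      · have hlf : (pvLF x L).isSome :=
          pv_lf_isSome_of_mem _ _ (by rw [hL]; exact hx)
        rw [if_pos ⟨hr, hlf⟩]
      · rw [if_neg (fun hc => hr hc.1)]
        have hx1 : x ≠ "profile-id" := by rintro rfl; simp [pvRen] at hr
        have hx2 : x ≠ "profile-name" := by rintro rfl; simp [pvRen] at hr
        simp [pvPStep, hx1, hx2]
    rw [hcong]
    by_cases hc : (pvRen (parts.getLast h)).isSome ∧ (pvLF (parts.getLast h) L).isSome
    · simp only [List.foldl_cons, List.foldl_nil]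
      rw [if_pos hc]
      have hmem : parts.getLast h ∈ parts.dropLast := by
        rw [← hL]; exact pv_lf_mem_of_isSome _ _ hc.2
      by_cases hz : parts.getLast h = "profile-id"
      · rw [hz]
        have hp1 : (parts.dropLast.foldl pvPStep ((false, false, false) : Bool × Bool × Bool)).1 = true := by
          rw [pv_pfold_fst]; simp [hz ▸ hmem]
        simp only [pvPStep, hp1, if_true]
        exact Prod.ext hp1.symm rfl
      · have hz2 : parts.getLast h = "profile-name" := by
          by_contra hz2
          rw [pvRen, if_neg hz, if_neg hz2] at hc
          simp at hc
        rw [hz2]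
        have hp2 : (parts.dropLast.foldl pvPStep ((false, false, false) : Bool × Bool × Bool)).2.1 = true := by
          rw [pv_pfold_snd]; simp [hz2 ▸ hmem]
        have hne : ("profile-name" : String) ≠ "profile-id" := by decide
        simp only [pvPStep, if_neg hne, hp2, if_true]
        exact Prod.ext rfl (Prod.ext hp2.symm rfl)
    · simp only [List.foldl_cons, List.foldl_nil]
      rw [if_neg hc]

lemma pv_state_eq (parts : List String) :
    pvRunA (none, none, false) (parts.zip parts.tail)
      = pvRunB (parts.zip parts.tail) (none, none, false) parts := by
  refine Prod.ext ?_ (Prod.ext ?_ ?_)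
  · rw [pv_runA_fst, pv_runB_fst]
    show pvLF "profile-id" (parts.zip parts.tail) = _
    by_cases hs : (pvLF "profile-id" (parts.zip parts.tail)).isSome
    · have hmem : "profile-id" ∈ parts :=
        (List.dropLast_sublist parts).mem
          (by rw [← pv_map_fst_zip_tail]; exact pv_lf_mem_of_isSome _ _ hs)
      rw [if_pos ⟨hmem, hs⟩]
    · rw [if_neg (fun hc => hs hc.2)]
      exact Option.not_isSome_iff_eq_none.mp hs
  · rw [pv_runA_snd, pv_runB_snd]
    show pvLF "profile-name" (parts.zip parts.tail) = _
    by_cases hs : (pvLF "profile-name" (parts.zip parts.tail)).isSome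
    · have hmem : "profile-name" ∈ parts :=
        (List.dropLast_sublist parts).mem
          (by rw [← pv_map_fst_zip_tail]; exact pv_lf_mem_of_isSome _ _ hs)
      rw [if_pos ⟨hmem, hs⟩]
    · rw [if_neg (fun hc => hs hc.2)]
      exact Option.not_isSome_iff_eq_none.mp hs
  · have e1 := congrArg (fun q => q.2.2) (pv_runA_proj (parts.zip parts.tail) (none, none, false))
    have e2 := congrArg (fun q => q.2.2) (pv_runB_proj (parts.zip parts.tail) parts (none, none, false))
    simp only [pvProj, Option.isSome_none] at e1 e2
    show (pvRunA (none, none, false) (parts.zip parts.tail)).2.2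
        = (pvRunB (parts.zip parts.tail) (none, none, false) parts).2.2
    rw [e1, e2]
    exact congrArg (fun q => q.2.2) (pv_flag_fold _ parts (pv_map_fst_zip_tail parts)).symm

lemma pv_enumA (parts : List String) (xs : List String) (s : Nat)
    (d : PySem.Dict String String) (h : xs = parts.drop s) :
    (PySem.List.enumerate xs (s : Int)).foldl
        (fun (d : PySem.Dict String String) ip =>
          if ip.2 = "profile-id" ∧ ip.1 + 1 < (parts.length : Int) then
            match PySem.List.pyGet? parts (ip.1 + 1) with
            | some v => d.insert "profile_id" v
            | none => d
          else if ip.2 = "profile-name" ∧ ip.1 + 1 < (parts.length : Int) then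
            match PySem.List.pyGet? parts (ip.1 + 1) with
            | some v => d.insert "profile_name" v
            | none => d
          else d) d
      = (xs.zip xs.tail).foldl (fun d pr => pvDStep d pr.1 pr.2) d := by
  induction xs generalizing s d with
  | nil => rw [PySem.List.enumerate_nil]; rfl
  | cons x xs' ih =>
      have hlen : parts.length - s = xs'.length + 1 := by
        have := congrArg List.length h
        simp [List.length_drop] at this
        omega
      have hslt : s < parts.length := by omega
      rw [PySem.List.enumerate_cons]
      cases xs' with
      | nil =>
          simp only [List.length_nil] at hlen
          have hnl : ¬((s : Int) + 1 < (parts.length : Int)) := by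
            have hps : parts.length = s + 1 := by omega
            rw [hps]; push_cast; omega
          simp [PySem.List.enumerate_nil, hnl]
      | cons y xs'' =>
          simp only [List.length_cons] at hlen
          have hd1 : parts.drop (s + 1) = y :: xs'' := by
            rw [← List.tail_drop, ← h]; rfl
          have hget : parts[s + 1]? = some y := by
            have h0 : (parts.drop (s + 1))[0]? = some y := by rw [hd1]; rfl
            rwa [List.getElem?_drop, Nat.add_zero] at h0
          have hlt : (s : Int) + 1 < (parts.length : Int) := by
            have h2 : s + 1 < parts.length := by omega
            exact_mod_cast h2
          have hcast : (s : Int) + 1 = ((s + 1 : Nat) : Int) := by push_cast; ring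
          have hpg : PySem.List.pyGet? parts ((s : Int) + 1) = some y := by
            rw [hcast, PySem.List.pyGet?_natCast, hget]
          have hstep :
              (if x = "profile-id" ∧ (s : Int) + 1 < (parts.length : Int) then
                match PySem.List.pyGet? parts ((s : Int) + 1) with
                | some v => d.insert "profile_id" v
                | none => d
              else if x = "profile-name" ∧ (s : Int) + 1 < (parts.length : Int) then
                match PySem.List.pyGet? parts ((s : Int) + 1) with
                | some v => d.insert "profile_name" v
                | none => d
              else d) = pvDStep d x y := by
            by_cases hx1 : x = "profile-id" <;> by_cases hx2 : x = "profile-name" <;>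
              simp [hx1, hx2, hlt, hpg, pvDStep]
          simp only [List.foldl_cons]
          rw [hstep, hcast, ih (s + 1) (pvDStep d x y) hd1.symm]
          rfl

lemma pv_dictA (parts : List String) :
    (PySem.List.enumerate parts).foldl
        (fun (d : PySem.Dict String String) ip =>
          if ip.2 = "profile-id" ∧ ip.1 + 1 < (parts.length : Int) then
            match PySem.List.pyGet? parts (ip.1 + 1) with
            | some v => d.insert "profile_id" v
            | none => d
          else if ip.2 = "profile-name" ∧ ip.1 + 1 < (parts.length : Int) then
            match PySem.List.pyGet? parts (ip.1 + 1) with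
            | some v => d.insert "profile_name" v
            | none => d
          else d) PySem.Dict.empty
      = pvToDict (pvRunA (none, none, false) (parts.zip parts.tail)) := by
  have h0 : (0 : Int) = ((0 : Nat) : Int) := rfl
  rw [show (PySem.List.enumerate parts : List (Int × String)) = PySem.List.enumerate parts ((0 : Nat) : Int) from rfl,
    pv_enumA parts parts 0 _ (by simp)]
  rw [show (PySem.Dict.empty : PySem.Dict String String) = pvToDict (none, none, false) from rfl,
    pv_foldA_toDict]

lemma pv_dictB (parts : List String) :
    parts.foldl
        (fun (d : PySem.Dict String String) p =>
          match (PySem.Dict.ofList [("profile-id", "profile_id"), ("profile-name", "profile_name")]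
              : PySem.Dict String String).get? p,
            ((parts.zip parts.tail).foldl
              (fun (d : PySem.Dict String String) pr => d.insert pr.1 pr.2)
              PySem.Dict.empty).get? p with
          | some k, some v => d.insert k v
          | _, _ => d) PySem.Dict.empty
      = pvToDict (pvRunB (parts.zip parts.tail) (none, none, false) parts) := by
  have hfun : ∀ (d : PySem.Dict String String) (p : String), p ∈ parts →
      (match (PySem.Dict.ofList [("profile-id", "profile_id"), ("profile-name", "profile_name")]
          : PySem.Dict String String).get? p,
        ((parts.zip parts.tail).foldl
          (fun (d : PySem.Dict String String) pr => d.insert pr.1 pr.2)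
          PySem.Dict.empty).get? p with
      | some k, some v => d.insert k v
      | _, _ => d)
      = (match pvRen p, pvLF p (parts.zip parts.tail) with
        | some k, some v => d.insert k v
        | _, _ => d) := by
    intro d p _
    rw [pv_ren_get, pv_follower_get]
    rfl
  rw [PySem.List.foldl_congr_mem _ _
      (fun d p =>
        match pvRen p, pvLF p (parts.zip parts.tail) with
        | some k, some v => d.insert k v
        | _, _ => d) _ hfun]
  rw [show (PySem.Dict.empty : PySem.Dict String String) = pvToDict (none, none, false) from rfl,
    pv_foldB_toDict]

-- ===== VERDICT (by name: the statement is the Claim_ definition above) =====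
theorem parse_ont_srv_profile_py_spec : Claim_equal_parse_ont_srv_profile_py := by
  intro line _
  unfold Spec_parse_ont_srv_profile_py
  simp only [parse_ont_srv_profile_py, parse_ont_srv_profile_py_alt, PySem.List.slice_from_one]
  rw [pv_dictA (PySem.Str.split₀ line), pv_dictB (PySem.Str.split₀ line), pv_state_eq]
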